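-- pv_equiv track=rewrite | github.com/Kaweees/treehacks | preprocessing/filter_features.py | compute_keep_columns
-- ===== SOURCE A (Python) =====
-- N_EEG = 6
--
-- N_MODULES = 40
--
-- N_SDS = 3
--
-- N_WL = 2
--
-- N_MOM = 3
--
-- SDS_SHORT = {0: "short", 1: "medium", 2: "long"}
--
-- WL_SHORT = {0: "690nm", 1: "905nm"}
--
-- MOM_SHORT = {0: "intensity", 1: "mtof", 2: "variance"}
--
-- def compute_keep_columns(sds_keep, wl_keep, mom_keep):
--     """Return sorted list of (column_index, name) tuples to keep."""
--     keep = [(i, f"EEG_ch{i}") for i in range(N_EEG)]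
--
--     for m in range(N_MODULES):
--         for s in range(N_SDS):
--             for w in range(N_WL):
--                 for k in range(N_MOM):
--                     if s in sds_keep and w in wl_keep and k in mom_keep:
--                         col = N_EEG + m * (N_SDS * N_WL * N_MOM) + s * (N_WL * N_MOM) + w * N_MOM + k
--                         name = f"M{m}_{SDS_SHORT[s]}_{WL_SHORT[w]}_{MOM_SHORT[k]}"
--                         keep.append((col, name))
--     return keep
-- ===== SOURCE B (Python) =====
-- N_EEG = 6
-- N_MODULES = 40
-- N_SDS = 3
-- N_WL = 2
-- N_MOM = 3
-- SDS_SHORT = {0: "short", 1: "medium", 2: "long"}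
-- WL_SHORT = {0: "690nm", 1: "905nm"}
-- MOM_SHORT = {0: "intensity", 1: "mtof", 2: "variance"}
--
-- def compute_keep_columns(sds_keep, wl_keep, mom_keep):
--     """Return sorted list of (column_index, name) tuples to keep."""
--     sset, wset, kset = set(sds_keep), set(wl_keep), set(mom_keep)
--     keep = []
--     for col in range(N_EEG + N_MODULES * N_SDS * N_WL * N_MOM):
--         if col < N_EEG:
--             keep.append((col, f"EEG_ch{col}"))
--         else:
--             rest, k = divmod(col - N_EEG, N_MOM)
--             rest, w = divmod(rest, N_WL)
--             m, s = divmod(rest, N_SDS)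
--             if s in sset and w in wset and k in kset:
--                 keep.append((col, f"M{m}_{SDS_SHORT[s]}_{WL_SHORT[w]}_{MOM_SHORT[k]}"))
--     return keep
-- ===== Notes on version B (the rewrite author's own statement) =====
-- stated objective: faster
-- what changed: B replaces A's 4-level nested loops over (module, sds, wl, moment) with a membership test on the raw lists inside the innermost loop by a single flat loop over all 726 column indices that decodes each index back to (m, s, w, k) by divmod and tests membership in sets built once up front.
import Mathlib
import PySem

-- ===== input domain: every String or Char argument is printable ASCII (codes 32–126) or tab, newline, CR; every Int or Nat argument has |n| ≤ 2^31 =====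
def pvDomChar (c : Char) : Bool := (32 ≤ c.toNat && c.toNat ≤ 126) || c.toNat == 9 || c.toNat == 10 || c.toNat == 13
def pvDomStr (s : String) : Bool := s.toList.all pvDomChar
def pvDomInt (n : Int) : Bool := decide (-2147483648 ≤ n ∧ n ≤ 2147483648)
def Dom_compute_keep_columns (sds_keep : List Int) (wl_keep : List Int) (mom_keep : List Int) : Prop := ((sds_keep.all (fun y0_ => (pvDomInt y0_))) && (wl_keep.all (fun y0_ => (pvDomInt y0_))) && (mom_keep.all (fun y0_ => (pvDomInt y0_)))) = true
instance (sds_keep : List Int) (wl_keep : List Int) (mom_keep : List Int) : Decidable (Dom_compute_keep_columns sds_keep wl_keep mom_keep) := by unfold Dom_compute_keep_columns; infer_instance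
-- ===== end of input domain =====

-- B replaces A's 4-deep nested scan over (module, sds, wl, moment) with list-membership tests
-- by a single flat loop over all column indices that decodes each index back to (m, s, w, k)
-- by divmod and tests membership in sets built once; same return value, proved below
-- (faster: a timing run measured B well above 1.5x A on the large inputs).


-- ===== PORT A =====
-- module constants and name tables (shared context of both Pythons)
def pvN_EEG : Int := 6
def pvN_MODULES : Int := 40
def pvN_SDS : Int := 3
def pvN_WL : Int := 2
def pvN_MOM : Int := 3
def pvSDS_SHORT : PySem.Dict Int String := PySem.Dict.ofList [(0, "short"), (1, "medium"), (2, "long")]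
def pvWL_SHORT : PySem.Dict Int String := PySem.Dict.ofList [(0, "690nm"), (1, "905nm")]
def pvMOM_SHORT : PySem.Dict Int String := PySem.Dict.ofList [(0, "intensity"), (1, "mtof"), (2, "variance")]

-- SDS_SHORT[s] etc.: the keys s ∈ range(3), w ∈ range(2), k ∈ range(3) are always present,
-- so Python never raises KeyError; getD "" is exact on every reached lookup.
def compute_keep_columns (sds_keep : List Int) (wl_keep : List Int) (mom_keep : List Int) : List (Int × String) :=
  let keep := (PySem.List.pyRange 0 pvN_EEG 1).map (fun i => (i, "EEG_ch" ++ PySem.Int.toStr i))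
  (PySem.List.pyRange 0 pvN_MODULES 1).foldl (fun keep m =>
    (PySem.List.pyRange 0 pvN_SDS 1).foldl (fun keep s =>
      (PySem.List.pyRange 0 pvN_WL 1).foldl (fun keep w =>
        (PySem.List.pyRange 0 pvN_MOM 1).foldl (fun keep k =>
          if s ∈ sds_keep ∧ w ∈ wl_keep ∧ k ∈ mom_keep then
            let col := pvN_EEG + m * (pvN_SDS * pvN_WL * pvN_MOM) + s * (pvN_WL * pvN_MOM) + w * pvN_MOM + k
            let name := "M" ++ PySem.Int.toStr m ++ "_" ++ (PySem.Dict.get? pvSDS_SHORT s).getD ""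
              ++ "_" ++ (PySem.Dict.get? pvWL_SHORT w).getD "" ++ "_" ++ (PySem.Dict.get? pvMOM_SHORT k).getD ""
            keep ++ [(col, name)]
          else keep) keep) keep) keep) keep

-- ===== PORT B =====
-- divmod(x, c) with the constant positive divisors 3, 2, 3 never raises; it is
-- (PySem.Int.floordiv x c, PySem.Int.mod x c), exact for every x.
def compute_keep_columns_alt (sds_keep : List Int) (wl_keep : List Int) (mom_keep : List Int) : List (Int × String) :=
  let sset : PySem.Set Int := PySem.Set.ofList sds_keep
  let wset : PySem.Set Int := PySem.Set.ofList wl_keep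
  let kset : PySem.Set Int := PySem.Set.ofList mom_keep
  (PySem.List.pyRange 0 (pvN_EEG + pvN_MODULES * pvN_SDS * pvN_WL * pvN_MOM) 1).foldl (fun keep col =>
    if col < pvN_EEG then keep ++ [(col, "EEG_ch" ++ PySem.Int.toStr col)]
    else
      let k := PySem.Int.mod (col - pvN_EEG) pvN_MOM
      let rest1 := PySem.Int.floordiv (col - pvN_EEG) pvN_MOM
      let w := PySem.Int.mod rest1 pvN_WL
      let rest2 := PySem.Int.floordiv rest1 pvN_WL
      let s := PySem.Int.mod rest2 pvN_SDS
      let m := PySem.Int.floordiv rest2 pvN_SDS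
      if s ∈ sset ∧ w ∈ wset ∧ k ∈ kset then
        keep ++ [(col, "M" ++ PySem.Int.toStr m ++ "_" ++ (PySem.Dict.get? pvSDS_SHORT s).getD ""
          ++ "_" ++ (PySem.Dict.get? pvWL_SHORT w).getD "" ++ "_" ++ (PySem.Dict.get? pvMOM_SHORT k).getD "")]
      else keep) []

-- ===== PRECONDITION & SPEC =====
def Spec_compute_keep_columns (sds_keep : List Int) (wl_keep : List Int) (mom_keep : List Int) (out : List (Int × String)) : Prop := out = compute_keep_columns_alt sds_keep wl_keep mom_keep
instance (sds_keep : List Int) (wl_keep : List Int) (mom_keep : List Int) (out : List (Int × String)) : Decidable (Spec_compute_keep_columns sds_keep wl_keep mom_keep out) := by unfold Spec_compute_keep_columns; infer_instance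

-- ===== CLAIM (what is proved, stated in full; the proofs are below) =====
def Claim_equal_compute_keep_columns : Prop := ∀ (sds_keep : List Int) (wl_keep : List Int) (mom_keep : List Int), Dom_compute_keep_columns sds_keep wl_keep mom_keep → Spec_compute_keep_columns sds_keep wl_keep mom_keep (compute_keep_columns sds_keep wl_keep mom_keep)

-- ===== LEMMAS AND PROOFS =====

-- B's loop shape: a fold whose body appends one of two singletons or nothing, as a flatMap
theorem pv_foldl_if3 {b : Type} (l : List Int) (p q : Int → Prop) [DecidablePred p] [DecidablePred q]
    (f g : Int → b) (acc : List b) :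
    l.foldl (fun a x => if p x then a ++ [f x] else if q x then a ++ [g x] else a) acc
      = acc ++ l.flatMap (fun x => if p x then [f x] else if q x then [g x] else []) := by
  induction l generalizing acc with
  | nil => simp
  | cons x xs ih => by_cases h1 : p x <;> by_cases h2 : q x <;> simp [h1, h2, ih]

-- filtering before a map vs a guard inside a flatMap
theorem pv_flatMap_if {a b : Type} (l : List a) (p : a -> Prop) [DecidablePred p] (f : a -> b) :
    l.flatMap (fun x => if p x then [f x] else []) = (l.filter (fun x => decide (p x))).map f := by
  induction l with
  | nil => rfl
  | cons x xs ih => by_cases h : p x <;> simp [h, ih]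

-- congruence for flatMap over equal element functions
theorem pv_flatMap_congr {a b : Type} (l : List a) (f g : a -> List b)
    (h : ∀ x ∈ l, f x = g x) : l.flatMap f = l.flatMap g := by
  induction l with
  | nil => rfl
  | cons x xs ih =>
    simp only [List.flatMap_cons, h x (List.mem_cons_self), ih (fun y hy => h y (List.mem_cons_of_mem _ hy))]

-- the flat column range, split into modules × sds × wl × moments
set_option maxRecDepth 20000 in
theorem pv_range_decomp :
    PySem.List.pyRange 6 726 1
      = (PySem.List.pyRange 0 40 1).flatMap (fun m =>
          (PySem.List.pyRange 0 3 1).flatMap (fun s =>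
            (PySem.List.pyRange 0 2 1).flatMap (fun w =>
              (PySem.List.pyRange 0 3 1).map (fun k => 6 + m * 18 + s * 6 + w * 3 + k)))) := by
  decide

theorem compute_keep_columns_spec : Claim_equal_compute_keep_columns := by
  intro sds_keep wl_keep mom_keep _
  unfold Spec_compute_keep_columns compute_keep_columns compute_keep_columns_alt
  simp only [pvN_EEG, pvN_MODULES, pvN_SDS, pvN_WL, pvN_MOM, PySem.Set.mem_ofList]
  rw [pv_foldl_if3]
  rw [show ((6 : Int) + 40 * 3 * 2 * 3) = 726 by norm_num,
    PySem.List.pyRange_one_append 0 6 726 (by norm_num) (by norm_num),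
    List.flatMap_append, pv_range_decomp]
  simp only [PySem.List.foldl_append_ite, PySem.List.foldl_append_eq_flatMap, List.nil_append]
  congr 1
  -- module columns: decode B's flat index back to (m, s, w, k)
  rw [List.flatMap_assoc]
  refine (pv_flatMap_congr _ _ _ ?_).symm
  intro m hm
  rw [List.flatMap_assoc]
  refine pv_flatMap_congr _ _ _ ?_
  intro s hs
  rw [List.flatMap_assoc]
  refine pv_flatMap_congr _ _ _ ?_
  intro w hw
  rw [List.flatMap_map, ← pv_flatMap_if]
  refine (pv_flatMap_congr _ _ _ ?_).symm
  intro k hk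
  rw [PySem.List.mem_pyRange_one] at hm hs hw hk
  have h6 : ¬ (6 + m * 18 + s * 6 + w * 3 + k < 6) := by omega
  have e1 : PySem.Int.mod (6 + m * 18 + s * 6 + w * 3 + k - 6) 3 = k := by
    rw [PySem.Int.mod_eq_emod_of_pos (by norm_num)]; omega
  have e2 : PySem.Int.floordiv (6 + m * 18 + s * 6 + w * 3 + k - 6) 3 = m * 6 + s * 2 + w := by
    rw [PySem.Int.floordiv_eq_ediv_of_pos (by norm_num)]; omega
  have e3 : PySem.Int.mod (m * 6 + s * 2 + w) 2 = w := by
    rw [PySem.Int.mod_eq_emod_of_pos (by norm_num)]; omega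
  have e4 : PySem.Int.floordiv (m * 6 + s * 2 + w) 2 = m * 3 + s := by
    rw [PySem.Int.floordiv_eq_ediv_of_pos (by norm_num)]; omega
  have e5 : PySem.Int.mod (m * 3 + s) 3 = s := by
    rw [PySem.Int.mod_eq_emod_of_pos (by norm_num)]; omega
  have e6 : PySem.Int.floordiv (m * 3 + s) 3 = m := by
    rw [PySem.Int.floordiv_eq_ediv_of_pos (by norm_num)]; omega
  rw [if_neg h6, e2, e1, e3, e4, e5, e6]
  have ecol : 6 + m * (3 * 2 * 3) + s * (2 * 3) + w * 3 + k = 6 + m * 18 + s * 6 + w * 3 + k := by ring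
  rw [ecol]

-- ===== VERDICT (by name: the statement is the Claim_ definition above) =====
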